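-- pv_equiv track=rewrite | github.com/bkkhyunn/Algorithm_prac | 프로그래머스/5/49190. 방의 개수/방의 개수.py | solution
-- ===== SOURCE A (Python) =====
-- def solution(arrows):
--
--     # 0 에서 7 까지 방향
--     dx = [-1, -1, 0, 1, 1, 1, 0, -1]
--     dy = [0, 1, 1, 1, 0, -1, -1, -1]
--     # 노드, 간선
--     v_set, e_set = set(), set()
--     v, e = 0, 0
--
--     # 시작점
--     x, y = 0, 0
--     v_set.add((x, y))
--
--     for arrow in arrows:
--
--         # 현재 노드(x,y) 에서 이동할 노드(nx, ny)
--         nx = x + dx[arrow]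
--         ny = y + dy[arrow]
--         opp = (arrow+4) % 8 # arrow 의 반대방향
--
--         # 현재(x, y) 에서 다음(nx, ny)로 가는 간선(arrow), 다음에서 현재로 오는 간선(arrow 반대 opp)
--         if ((x, y, arrow) not in e_set) and ((nx, ny, opp) not in e_set):
--
--             if arrow % 2: # 대각선일 때 다른 대각선과 교차하는 지점이 있는지 확인
--
--                 # 1) 현재에서 (arrow-1) 방향으로 이동한 점에서 (arrow+2) 방향으로 이동하는 간선과 교차하는지
--                 case_1 = ((x + dx[arrow-1]), (y + dy[arrow-1]), (arrow+2)%8)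
--                 # 2) 현재에서 (arrow+1) 방향으로 이동한 점에서 (arrow-2) 방향으로 이동하는 간선과 교차하는지
--                 case_2 = (x + dx[(arrow + 1)%8], y + dy[(arrow + 1)%8], (arrow-2)%8)
--
--                 # 교차되는 대각선이 지나간 간선에 있다면
--                 if case_1 in e_set or case_2 in e_set:
--                     e += 2 # 간선은 총 4개가 생긴다.(대각선 2개는 이미 e_set에 있기 때문에 2를 더한다.)
--                     v += 1 # 점은 1개가 생긴다.
--
--             v_set.add((nx, ny))
--             e_set.add((x, y, arrow))
--
--         # 좌표 갱신
--         x = nx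
--         y = ny
--
--     # 점과 선의 개수를 더한다.
--     v += len(v_set)
--     e += len(e_set)
--
--     # 오일러 지표대로 리턴
--     return 1 + e - v
-- ===== SOURCE B (Python) =====
-- def solution(arrows):
--     # Doubled-coordinate walk: each arrow is two unit half-steps through a midpoint
--     # node, so crossing diagonals share the midpoint automatically; edges are
--     # canonical unordered pairs so a returning path does not recount a segment.
--     dx = [-1, -1, 0, 1, 1, 1, 0, -1]
--     dy = [0, 1, 1, 1, 0, -1, -1, -1]
--     verts = {(0, 0)}
--     edges = set()
--     x, y = 0, 0
--     for a in arrows: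
--         m = (x + dx[a], y + dy[a])
--         q = (x + 2 * dx[a], y + 2 * dy[a])
--         p = (x, y)
--         verts.add(m)
--         verts.add(q)
--         edges.add((p, m) if p <= m else (m, p))
--         edges.add((m, q) if m <= q else (q, m))
--         x, y = q
--     return len(edges) - len(verts) + 1
-- ===== Notes on version B (the rewrite author's own statement) =====
-- stated objective: simpler
-- what changed: B walks the path in doubled coordinates, inserting each arrow's midpoint node and its two unit half-segments as canonical unordered pairs into sets, so diagonal crossings share the midpoint automatically and A's case_1/case_2 crossing-detection logic disappears; both return 1 + E - V.
-- outside the precondition, e.g. on solution([-1, 3]): A returns 1, B returns 0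
import Mathlib
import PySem

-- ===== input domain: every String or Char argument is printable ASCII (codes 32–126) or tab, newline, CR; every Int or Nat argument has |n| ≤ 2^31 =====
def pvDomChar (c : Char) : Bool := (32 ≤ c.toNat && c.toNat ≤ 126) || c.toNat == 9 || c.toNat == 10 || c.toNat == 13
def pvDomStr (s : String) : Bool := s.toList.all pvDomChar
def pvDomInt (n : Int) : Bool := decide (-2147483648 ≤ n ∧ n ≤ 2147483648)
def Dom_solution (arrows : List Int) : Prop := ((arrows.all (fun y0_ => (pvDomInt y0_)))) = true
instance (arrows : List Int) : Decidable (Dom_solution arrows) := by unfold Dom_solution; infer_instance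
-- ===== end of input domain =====

-- B replaces A's case_1/case_2 diagonal-crossing bookkeeping by walking doubled
-- coordinates through midpoint nodes with canonical unordered unit edges (simpler).

-- ===== PORT A =====
-- shared direction tables (both Pythons define the same dx/dy lists)
def pvDx : List Int := [-1, -1, 0, 1, 1, 1, 0, -1]
def pvDy : List Int := [0, 1, 1, 1, 0, -1, -1, -1]
-- list indexing; Python raises IndexError where pyGet? is none (outside Pre_), default 0 there
def pvIx (l : List Int) (i : Int) : Int := (PySem.List.pyGet? l i).getD 0

-- loop body of A, state (v_set, e_set, v, e, x, y)
def stepA (st : PySem.Set (Int × Int) × PySem.Set (Int × Int × Int) × Int × Int × Int × Int)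
    (arrow : Int) : PySem.Set (Int × Int) × PySem.Set (Int × Int × Int) × Int × Int × Int × Int :=
  match st with
  | (vs, es, v, e, x, y) =>
    let nx := x + pvIx pvDx arrow
    let ny := y + pvIx pvDy arrow
    let opp := PySem.Int.mod (arrow + 4) 8
    if (¬ PySem.Set.contains es (x, y, arrow)) ∧ (¬ PySem.Set.contains es (nx, ny, opp)) then
      let ve :=
        if PySem.Int.mod arrow 2 ≠ 0 then
          let case1 := (x + pvIx pvDx (arrow - 1), y + pvIx pvDy (arrow - 1), PySem.Int.mod (arrow + 2) 8)
          let case2 := (x + pvIx pvDx (PySem.Int.mod (arrow + 1) 8), y + pvIx pvDy (PySem.Int.mod (arrow + 1) 8), PySem.Int.mod (arrow - 2) 8)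
          if PySem.Set.contains es case1 ∨ PySem.Set.contains es case2 then (v + 1, e + 2)
          else (v, e)
        else (v, e)
      (PySem.Set.add vs (nx, ny), PySem.Set.add es (x, y, arrow), ve.1, ve.2, nx, ny)
    else (vs, es, v, e, nx, ny)

def solution (arrows : List Int) : Int :=
  match arrows.foldl stepA (PySem.Set.add PySem.Set.empty ((0 : Int), (0 : Int)), PySem.Set.empty, 0, 0, 0, 0) with
  | (vs, es, v, e, _, _) => 1 + (e + PySem.Set.len es) - (v + PySem.Set.len vs)

-- ===== PORT B =====
-- canonical unordered pair: '(p, q) if p <= q else (q, p)' (Python lex tuple order)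
def pvCanon (u w : Int × Int) : (Int × Int) × (Int × Int) :=
  if u.1 < w.1 ∨ (u.1 = w.1 ∧ u.2 ≤ w.2) then (u, w) else (w, u)

-- loop body of B, state (verts, edges, x, y) in doubled coordinates
def stepB (st : PySem.Set (Int × Int) × PySem.Set ((Int × Int) × (Int × Int)) × Int × Int)
    (a : Int) : PySem.Set (Int × Int) × PySem.Set ((Int × Int) × (Int × Int)) × Int × Int :=
  match st with
  | (verts, edges, x, y) =>
    let m := (x + pvIx pvDx a, y + pvIx pvDy a)
    let q := (x + 2 * pvIx pvDx a, y + 2 * pvIx pvDy a)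
    let p := (x, y)
    (PySem.Set.add (PySem.Set.add verts m) q,
     PySem.Set.add (PySem.Set.add edges (pvCanon p m)) (pvCanon m q),
     q.1, q.2)

def solution_alt (arrows : List Int) : Int :=
  match arrows.foldl stepB (PySem.Set.add PySem.Set.empty ((0 : Int), (0 : Int)), PySem.Set.empty, 0, 0) with
  | (verts, edges, _, _) => PySem.Set.len edges - PySem.Set.len verts + 1

-- ===== PRECONDITION & SPEC =====
-- Pre_ restricts to the puzzle's direction codes 0..7 (its natural domain): A raises
-- IndexError for codes outside -8..7, and for negative codes A's visited-edge keys store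
-- the raw negative value so its duplicate-edge detection is accidental.
def Pre_solution (arrows : List Int) : Prop := ∀ a ∈ arrows, 0 ≤ a ∧ a < 8
instance (arrows : List Int) : Decidable (Pre_solution arrows) := by unfold Pre_solution; infer_instance
def pvWitness_solution : List Int := [6, 6, 6, 4, 4, 4, 2, 2, 2, 0, 0, 0, 1, 6, 5, 5, 3, 6, 0]
def Spec_solution (arrows : List Int) (out : Int) : Prop := out = solution_alt arrows
instance (arrows : List Int) (out : Int) : Decidable (Spec_solution arrows out) := by unfold Spec_solution; infer_instance

-- ===== CLAIM (what is proved, stated in full; the proofs are below) =====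
def Claim_equal_solution : Prop := ∀ (arrows : List Int), Dom_solution arrows → Pre_solution arrows → Spec_solution arrows (solution arrows)

-- ===== LEMMAS AND PROOFS =====

-- set utilities
theorem pv_add_of_mem {α : Type} [BEq α] [LawfulBEq α] (s : PySem.Set α) (x : α) (h : x ∈ s) :
    PySem.Set.add s x = s := by
  simp [PySem.Set.add, h]

theorem pv_add_len {α : Type} [BEq α] [LawfulBEq α] (s : PySem.Set α) (x : α) :
    PySem.Set.len (PySem.Set.add s x) =
      if x ∈ s then PySem.Set.len s else PySem.Set.len s + 1 := by
  by_cases h : x ∈ s <;>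
    simp [PySem.Set.add, h, PySem.Set.len]

theorem pvmod8 (x : Int) : PySem.Int.mod x 8 = x % 8 := PySem.Int.mod_eq_emod_of_pos (by norm_num)
theorem pvmod2 (x : Int) : PySem.Int.mod x 2 = x % 2 := PySem.Int.mod_eq_emod_of_pos (by norm_num)

-- canonical unordered pairs
theorem pvCanon_cases (u w u' w' : Int × Int) (h : pvCanon u w = pvCanon u' w') :
    (u = u' ∧ w = w') ∨ (u = w' ∧ w = u') := by
  unfold pvCanon at h
  split_ifs at h <;> rcases Prod.mk.injEq .. ▸ h with ⟨h1, h2⟩ <;> subst h1 <;> subst h2 <;> simp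

theorem pvCanon_comm (u w : Int × Int) : pvCanon u w = pvCanon w u := by
  rcases u with ⟨u1, u2⟩; rcases w with ⟨w1, w2⟩
  unfold pvCanon
  split_ifs with h1 h2 h2 <;> simp_all <;> [skip; skip] <;> omega

-- direction vector of a code, as a pair
def pvD (a : Int) : Int × Int := (pvIx pvDx a, pvIx pvDy a)

-- direction-table evaluation facts
lemma pvD0 : pvD 0 = (-1, 0) := by decide
lemma pvD1 : pvD 1 = (-1, 1) := by decide
lemma pvD2 : pvD 2 = (0, 1) := by decide
lemma pvD3 : pvD 3 = (1, 1) := by decide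
lemma pvD4 : pvD 4 = (1, 0) := by decide
lemma pvD5 : pvD 5 = (1, -1) := by decide
lemma pvD6 : pvD 6 = (0, -1) := by decide
lemma pvD7 : pvD 7 = (-1, -1) := by decide
lemma pvDs0a : pvD (0-1) = (-1, -1) := by decide
lemma pvDs0b : pvD ((0+1) % 8) = (-1, 1) := by decide
lemma pvDs1a : pvD (1-1) = (-1, 0) := by decide
lemma pvDs1b : pvD ((1+1) % 8) = (0, 1) := by decide
lemma pvDs2a : pvD (2-1) = (-1, 1) := by decide
lemma pvDs2b : pvD ((2+1) % 8) = (1, 1) := by decide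
lemma pvDs3a : pvD (3-1) = (0, 1) := by decide
lemma pvDs3b : pvD ((3+1) % 8) = (1, 0) := by decide
lemma pvDs4a : pvD (4-1) = (1, 1) := by decide
lemma pvDs4b : pvD ((4+1) % 8) = (1, -1) := by decide
lemma pvDs5a : pvD (5-1) = (1, 0) := by decide
lemma pvDs5b : pvD ((5+1) % 8) = (0, -1) := by decide
lemma pvDs6a : pvD (6-1) = (1, -1) := by decide
lemma pvDs6b : pvD ((6+1) % 8) = (-1, -1) := by decide
lemma pvDs7a : pvD (7-1) = (0, -1) := by decide
lemma pvDs7b : pvD ((7+1) % 8) = (-1, 0) := by decide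

-- no direction vector is even in both components
theorem pvD_not_even (d : Int) (h0 : 0 ≤ d) (h8 : d < 8) :
    (pvD d).1 % 2 ≠ 0 ∨ (pvD d).2 % 2 ≠ 0 := by
  interval_cases d <;> decide

-- the reverse direction code has the negated vector
theorem pvD_opp (a : Int) (h0 : 0 ≤ a) (h8 : a < 8) :
    pvD ((a+4) % 8) = (-(pvD a).1, -(pvD a).2) ∧ 0 ≤ (a+4) % 8 ∧ (a+4) % 8 < 8 := by
  interval_cases a <;> decide

-- which directed edges share a doubled midpoint: only the edge itself, its reverse,
-- and (for diagonals) A's two crossing candidates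
set_option maxHeartbeats 1000000 in
theorem pv_classify (a d px py x y : Int) (ha0 : 0 ≤ a) (ha8 : a < 8) (hd0 : 0 ≤ d) (hd8 : d < 8)
    (h1 : 2*px + (pvD d).1 = 2*x + (pvD a).1) (h2 : 2*py + (pvD d).2 = 2*y + (pvD a).2) :
    ((px, py, d) = ((x, y, a) : Int × Int × Int)) ∨
    ((px, py, d) = (x + (pvD a).1, y + (pvD a).2, (a+4) % 8)) ∨
    (a % 2 ≠ 0 ∧
      (((px, py, d) = (x + (pvD (a-1)).1, y + (pvD (a-1)).2, (a+2) % 8)) ∨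
       ((px, py, d) = (x + (pvD ((a+1) % 8)).1, y + (pvD ((a+1) % 8)).2, (a-2) % 8)))) := by
  interval_cases a <;> interval_cases d <;>
    simp only [pvD0, pvD1, pvD2, pvD3, pvD4, pvD5, pvD6, pvD7, pvDs0a, pvDs0b, pvDs1a, pvDs1b,
      pvDs2a, pvDs2b, pvDs3a, pvDs3b, pvDs4a, pvDs4b, pvDs5a, pvDs5b, pvDs6a, pvDs6b, pvDs7a,
      pvDs7b, Prod.ext_iff, and_true] at h1 h2 ⊢ <;> omega

-- the two crossing candidates pass through the same doubled midpoint
theorem pvD_case1 (a : Int) (h0 : 0 ≤ a) (h8 : a < 8) (hodd : a % 2 ≠ 0) :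
    2 * (pvD (a-1)).1 + (pvD ((a+2) % 8)).1 = (pvD a).1 ∧
    2 * (pvD (a-1)).2 + (pvD ((a+2) % 8)).2 = (pvD a).2 ∧
    0 ≤ (a+2) % 8 ∧ (a+2) % 8 < 8 := by
  interval_cases a <;> first | exact absurd hodd (by decide) | decide

theorem pvD_case2 (a : Int) (h0 : 0 ≤ a) (h8 : a < 8) (hodd : a % 2 ≠ 0) :
    2 * (pvD ((a+1) % 8)).1 + (pvD ((a-2) % 8)).1 = (pvD a).1 ∧
    2 * (pvD ((a+1) % 8)).2 + (pvD ((a-2) % 8)).2 = (pvD a).2 ∧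
    0 ≤ (a-2) % 8 ∧ (a-2) % 8 < 8 := by
  interval_cases a <;> first | exact absurd hodd (by decide) | decide

-- the crossing candidates' full-lattice endpoints avoid the current edge's endpoints
theorem pvD_sep (a : Int) (h0 : 0 ≤ a) (h8 : a < 8) (hodd : a % 2 ≠ 0) :
    (pvD (a-1) ≠ (0, 0)) ∧
    (((pvD (a-1)).1 + (pvD ((a+2) % 8)).1, (pvD (a-1)).2 + (pvD ((a+2) % 8)).2) ≠ ((0 : Int), (0 : Int))) ∧
    (pvD (a-1) ≠ pvD a) ∧
    (((pvD (a-1)).1 + (pvD ((a+2) % 8)).1, (pvD (a-1)).2 + (pvD ((a+2) % 8)).2) ≠ pvD a) ∧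
    (pvD ((a+1) % 8) ≠ (0, 0)) ∧
    (((pvD ((a+1) % 8)).1 + (pvD ((a-2) % 8)).1, (pvD ((a+1) % 8)).2 + (pvD ((a-2) % 8)).2) ≠ ((0 : Int), (0 : Int))) ∧
    (pvD ((a+1) % 8) ≠ pvD a) ∧
    (((pvD ((a+1) % 8)).1 + (pvD ((a-2) % 8)).1, (pvD ((a+1) % 8)).2 + (pvD ((a-2) % 8)).2) ≠ pvD a) := by
  interval_cases a <;> first | exact absurd hodd (by decide) | decide

-- doubled midpoint / half-edges of a directed full edge (x, y, d) of A
def pvMid (t : Int × Int × Int) : Int × Int := (2 * t.1 + (pvD t.2.2).1, 2 * t.2.1 + (pvD t.2.2).2)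
def pvHalf1 (t : Int × Int × Int) : (Int × Int) × (Int × Int) := pvCanon (2 * t.1, 2 * t.2.1) (pvMid t)
def pvHalf2 (t : Int × Int × Int) : (Int × Int) × (Int × Int) :=
  pvCanon (pvMid t) (2 * (t.1 + (pvD t.2.2).1), 2 * (t.2.1 + (pvD t.2.2).2))

theorem pvMid_mk (x y d : Int) : pvMid (x, y, d) = (2*x + (pvD d).1, 2*y + (pvD d).2) := rfl

-- a doubled midpoint is never a doubled lattice point
theorem pvMid_ne_double (t : Int × Int × Int) (h0 : 0 ≤ t.2.2) (h8 : t.2.2 < 8) (p : Int × Int) :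
    pvMid t ≠ (2 * p.1, 2 * p.2) := by
  have := pvD_not_even t.2.2 h0 h8
  intro h; rw [Prod.ext_iff] at h; simp only [pvMid] at h; omega

-- matching canonical pairs of a doubled point and a midpoint
theorem pv_canon_dm (p p' m m' : Int × Int)
    (hm' : ∀ q : Int × Int, m' ≠ (2 * q.1, 2 * q.2))
    (h : pvCanon (2 * p.1, 2 * p.2) m = pvCanon (2 * p'.1, 2 * p'.2) m') :
    p = p' ∧ m = m' := by
  rcases pvCanon_cases _ _ _ _ h with ⟨h1, h2⟩ | ⟨h1, h2⟩
  · refine ⟨?_, h2⟩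
    rcases p with ⟨p1, p2⟩; rcases p' with ⟨p1', p2'⟩
    rw [Prod.ext_iff] at h1 ⊢; simp only at h1 ⊢; omega
  · exact absurd h1.symm (hm' p)

theorem pvIx_x (z : Int) : pvIx pvDx z = (pvD z).1 := rfl
theorem pvIx_y (z : Int) : pvIx pvDy z = (pvD z).2 := rfl

-- the simulation invariant between A's loop state and B's loop state
def pvInv (sa : PySem.Set (Int × Int) × PySem.Set (Int × Int × Int) × Int × Int × Int × Int)
    (sb : PySem.Set (Int × Int) × PySem.Set ((Int × Int) × (Int × Int)) × Int × Int) : Prop :=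
  match sa, sb with
  | (vs, es, v, e, x, y), (V, E, X, Y) =>
    X = 2 * x ∧ Y = 2 * y ∧
    (∀ q, q ∈ V ↔ ((∃ p ∈ vs, q = (2 * p.1, 2 * p.2)) ∨ ∃ t ∈ es, q = pvMid t)) ∧
    (∀ h, h ∈ E ↔ ∃ t ∈ es, h = pvHalf1 t ∨ h = pvHalf2 t) ∧
    PySem.Set.len V = PySem.Set.len vs + PySem.Set.len es - v ∧
    PySem.Set.len E = 2 * PySem.Set.len es ∧
    e = 2 * v ∧
    (∀ t ∈ es, 0 ≤ t.2.2 ∧ t.2.2 < 8) ∧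
    (x, y) ∈ vs ∧
    (∀ t ∈ es, (t.1, t.2.1) ∈ vs ∧ (t.1 + (pvD t.2.2).1, t.2.1 + (pvD t.2.2).2) ∈ vs)

set_option maxHeartbeats 4000000 in
theorem pv_step (vs : PySem.Set (Int × Int)) (es : PySem.Set (Int × Int × Int)) (v e x y : Int)
    (V : PySem.Set (Int × Int)) (E : PySem.Set ((Int × Int) × (Int × Int))) (X Y : Int)
    (a : Int) (h0 : 0 ≤ a) (h8 : a < 8)
    (hinv : pvInv (vs, es, v, e, x, y) (V, E, X, Y)) :
    pvInv (stepA (vs, es, v, e, x, y) a) (stepB (V, E, X, Y) a) := by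
  obtain ⟨hX, hY, hV, hE, hlV, hlE, he, hdir, hxy, hends⟩ := hinv
  subst hX; subst hY
  have hopp := pvD_opp a h0 h8
  simp only [stepA, stepB, pvmod8, pvmod2, PySem.Set.contains_iff, pvIx_x, pvIx_y]
  have hq : ((2*x + 2*(pvD a).1, 2*y + 2*(pvD a).2) : Int × Int)
      = (2*(x + (pvD a).1), 2*(y + (pvD a).2)) := by
    rw [Prod.mk.injEq]; exact ⟨by ring, by ring⟩
  rw [hq, show ((2*x + (pvD a).1, 2*y + (pvD a).2) : Int × Int) = pvMid (x, y, a) from rfl,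
    show pvCanon (2*x, 2*y) (pvMid (x, y, a)) = pvHalf1 (x, y, a) from rfl,
    show pvCanon (pvMid (x, y, a)) (2*(x + (pvD a).1), 2*(y + (pvD a).2)) = pvHalf2 (x, y, a) from rfl]
  have hrevmid : pvMid (x + (pvD a).1, y + (pvD a).2, (a+4) % 8) = pvMid (x, y, a) := by
    simp only [pvMid, hopp.1]; rw [Prod.mk.injEq]; exact ⟨by ring, by ring⟩
  have hrevh1 : pvHalf1 (x + (pvD a).1, y + (pvD a).2, (a+4) % 8) = pvHalf2 (x, y, a) := by
    simp only [pvHalf1, pvHalf2, hrevmid]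
    exact pvCanon_comm _ _
  have hrevh2 : pvHalf2 (x + (pvD a).1, y + (pvD a).2, (a+4) % 8) = pvHalf1 (x, y, a) := by
    simp only [pvHalf1, pvHalf2, hrevmid, hopp.1]
    rw [show ((2*(x + (pvD a).1 + -(pvD a).1), 2*(y + (pvD a).2 + -(pvD a).2)) : Int × Int)
        = ((2*x, 2*y) : Int × Int) from by rw [Prod.mk.injEq]; exact ⟨by ring, by ring⟩]
    exact pvCanon_comm _ _
  have hmid_even : ∀ t' ∈ es, ∀ p : Int × Int, pvMid t' ≠ (2 * p.1, 2 * p.2) :=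
    fun t' ht' p => pvMid_ne_double t' (hdir t' ht').1 (hdir t' ht').2 p
  have hmida : ∀ p : Int × Int, pvMid (x, y, a) ≠ (2 * p.1, 2 * p.2) :=
    pvMid_ne_double (x, y, a) h0 h8
  by_cases hC : ((x, y, a) ∈ es ∨ (x + (pvD a).1, y + (pvD a).2, (a+4) % 8) ∈ es)
  · -- duplicate edge: A adds nothing; every B add is a no-op
    rw [if_neg (by tauto)]
    have hmemmid : pvMid (x, y, a) ∈ V := by
      rcases hC with h | h
      · exact (hV _).mpr (Or.inr ⟨_, h, rfl⟩)
      · exact (hV _).mpr (Or.inr ⟨_, h, hrevmid.symm⟩)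
    have hnxvs : (x + (pvD a).1, y + (pvD a).2) ∈ vs := by
      rcases hC with h | h
      · exact (hends _ h).2
      · exact (hends _ h).1
    have hmemq : ((2*(x + (pvD a).1), 2*(y + (pvD a).2)) : Int × Int) ∈ V :=
      (hV _).mpr (Or.inl ⟨_, hnxvs, rfl⟩)
    have hmemh1 : pvHalf1 (x, y, a) ∈ E := by
      rcases hC with h | h
      · exact (hE _).mpr ⟨_, h, Or.inl rfl⟩
      · exact (hE _).mpr ⟨_, h, Or.inr hrevh2.symm⟩
    have hmemh2 : pvHalf2 (x, y, a) ∈ E := by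
      rcases hC with h | h
      · exact (hE _).mpr ⟨_, h, Or.inr rfl⟩
      · exact (hE _).mpr ⟨_, h, Or.inl hrevh1.symm⟩
    rw [pv_add_of_mem _ _ hmemmid, pv_add_of_mem _ _ hmemq,
        pv_add_of_mem _ _ hmemh1, pv_add_of_mem _ _ hmemh2]
    exact ⟨by ring, by ring, hV, hE, hlV, hlE, he, hdir, hnxvs, hends⟩
  · -- fresh edge
    rw [not_or] at hC
    obtain ⟨hCt, hCr⟩ := hC
    rw [if_pos ⟨hCt, hCr⟩]
    -- the doubled endpoint is in V exactly when A has visited it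
    have hqiff : ((2*(x + (pvD a).1), 2*(y + (pvD a).2)) : Int × Int) ∈ V
        ↔ (x + (pvD a).1, y + (pvD a).2) ∈ vs := by
      rw [hV]
      constructor
      · rintro (⟨p, hp, hpe⟩ | ⟨t', ht', hte⟩)
        · rcases p with ⟨p1, p2⟩
          simp only [Prod.mk.injEq] at hpe
          have h1 : p1 = x + (pvD a).1 := by omega
          have h2 : p2 = y + (pvD a).2 := by omega
          subst h1; subst h2; exact hp
        · exact absurd hte.symm (hmid_even t' ht' (x + (pvD a).1, y + (pvD a).2))
      · intro h; exact Or.inl ⟨_, h, rfl⟩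
    -- the midpoint is already in V exactly when A detects a diagonal crossing
    have hmiff : pvMid (x, y, a) ∈ V
        ↔ (a % 2 ≠ 0 ∧ ((x + (pvD (a-1)).1, y + (pvD (a-1)).2, (a+2) % 8) ∈ es
            ∨ (x + (pvD ((a+1) % 8)).1, y + (pvD ((a+1) % 8)).2, (a-2) % 8) ∈ es)) := by
      rw [hV]
      constructor
      · rintro (⟨p, hp, hpe⟩ | ⟨t', ht', hte⟩)
        · exact absurd hpe (hmida p)
        · rcases t' with ⟨px, py, d⟩
          obtain ⟨hd0, hd8⟩ := hdir _ ht'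
          simp only [pvMid_mk, Prod.mk.injEq] at hte
          rcases pv_classify a d px py x y h0 h8 hd0 hd8 (by omega) (by omega) with
            hcl | hcl | ⟨hodd, hcl | hcl⟩
          · exact absurd (hcl ▸ ht') hCt
          · exact absurd (hcl ▸ ht') hCr
          · exact ⟨hodd, Or.inl (hcl ▸ ht')⟩
          · exact ⟨hodd, Or.inr (hcl ▸ ht')⟩
      · rintro ⟨hodd, hc | hc⟩
        · refine Or.inr ⟨_, hc, ?_⟩
          obtain ⟨e1, e2, _, _⟩ := pvD_case1 a h0 h8 hodd
          simp only [pvMid_mk, Prod.mk.injEq]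
          constructor <;> omega
        · refine Or.inr ⟨_, hc, ?_⟩
          obtain ⟨e1, e2, _, _⟩ := pvD_case2 a h0 h8 hodd
          simp only [pvMid_mk, Prod.mk.injEq]
          constructor <;> omega
    -- any coincidence of half-edges would force a shared full-lattice endpoint
    have hcore : ∀ t' ∈ es, ∀ b b' : Int × Int,
        (b = (x, y) ∨ b = (x + (pvD a).1, y + (pvD a).2)) →
        (b' = (t'.1, t'.2.1) ∨ b' = (t'.1 + (pvD t'.2.2).1, t'.2.1 + (pvD t'.2.2).2)) →
        pvMid (x, y, a) = pvMid t' → b = b' → False := by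
      rintro ⟨px, py, d⟩ ht' b b' hb hb' hmid hbb
      obtain ⟨hd0, hd8⟩ := hdir _ ht'
      dsimp only at hb' hd0 hd8
      simp only [pvMid_mk, Prod.mk.injEq] at hmid
      rcases pv_classify a d px py x y h0 h8 hd0 hd8 (by omega) (by omega) with
        hcl | hcl | ⟨hodd, hcl | hcl⟩
      · exact hCt (hcl ▸ ht')
      · exact hCr (hcl ▸ ht')
      · obtain ⟨s1, s2, s3, s4, _, _, _, _⟩ := pvD_sep a h0 h8 hodd
        simp only [Prod.mk.injEq] at hcl
        obtain ⟨hpx, hpy, hpd⟩ := hcl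
        subst hpx; subst hpy; subst hpd
        rcases hb with hb | hb <;> rcases hb' with hb' | hb' <;> subst hb <;> subst hb' <;>
          simp [Prod.ext_iff] at hbb s1 s2 s3 s4 <;> omega
      · obtain ⟨_, _, _, _, s5, s6, s7, s8⟩ := pvD_sep a h0 h8 hodd
        simp only [Prod.mk.injEq] at hcl
        obtain ⟨hpx, hpy, hpd⟩ := hcl
        subst hpx; subst hpy; subst hpd
        rcases hb with hb | hb <;> rcases hb' with hb' | hb' <;> subst hb <;> subst hb' <;>
          simp [Prod.ext_iff] at hbb s5 s6 s7 s8 <;> omega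
    have hf1 : pvHalf1 (x, y, a) ∉ E := by
      intro hmem
      obtain ⟨t', ht', hh | hh⟩ := (hE _).mp hmem
      · obtain ⟨hbase, hmid⟩ := pv_canon_dm (x, y) (t'.1, t'.2.1) _ _ (hmid_even _ ht') hh
        exact hcore t' ht' _ _ (Or.inl rfl) (Or.inl rfl) hmid hbase
      · rw [show pvHalf2 t' = pvCanon (2*(t'.1 + (pvD t'.2.2).1), 2*(t'.2.1 + (pvD t'.2.2).2))
            (pvMid t') from pvCanon_comm _ _] at hh
        obtain ⟨hbase, hmid⟩ := pv_canon_dm (x, y)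
          (t'.1 + (pvD t'.2.2).1, t'.2.1 + (pvD t'.2.2).2) _ _ (hmid_even _ ht') hh
        exact hcore t' ht' _ _ (Or.inl rfl) (Or.inr rfl) hmid hbase
    have hf2 : pvHalf2 (x, y, a) ∉ E := by
      intro hmem
      obtain ⟨t', ht', hh | hh⟩ := (hE _).mp hmem
      · rw [show pvHalf2 (x, y, a) = pvCanon (2*(x + (pvD a).1), 2*(y + (pvD a).2))
            (pvMid (x, y, a)) from pvCanon_comm _ _] at hh
        obtain ⟨hbase, hmid⟩ := pv_canon_dm (x + (pvD a).1, y + (pvD a).2) (t'.1, t'.2.1) _ _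
          (hmid_even _ ht') hh
        exact hcore t' ht' _ _ (Or.inr rfl) (Or.inl rfl) hmid hbase
      · rw [show pvHalf2 (x, y, a) = pvCanon (2*(x + (pvD a).1), 2*(y + (pvD a).2))
            (pvMid (x, y, a)) from pvCanon_comm _ _,
          show pvHalf2 t' = pvCanon (2*(t'.1 + (pvD t'.2.2).1), 2*(t'.2.1 + (pvD t'.2.2).2))
            (pvMid t') from pvCanon_comm _ _] at hh
        obtain ⟨hbase, hmid⟩ := pv_canon_dm (x + (pvD a).1, y + (pvD a).2)
          (t'.1 + (pvD t'.2.2).1, t'.2.1 + (pvD t'.2.2).2) _ _ (hmid_even _ ht') hh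
        exact hcore t' ht' _ _ (Or.inr rfl) (Or.inr rfl) hmid hbase
    have hh12 : pvHalf1 (x, y, a) ≠ pvHalf2 (x, y, a) := by
      intro h
      rw [show pvHalf2 (x, y, a) = pvCanon (2*(x + (pvD a).1), 2*(y + (pvD a).2))
          (pvMid (x, y, a)) from pvCanon_comm _ _] at h
      obtain ⟨hbase, -⟩ := pv_canon_dm (x, y) (x + (pvD a).1, y + (pvD a).2) _ _ hmida h
      have hne := pvD_not_even a h0 h8
      simp only [Prod.mk.injEq] at hbase
      omega
    have hqmem : ((2*(x + (pvD a).1), 2*(y + (pvD a).2)) : Int × Int)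
        ∈ PySem.Set.add V (pvMid (x, y, a)) ↔ (x + (pvD a).1, y + (pvD a).2) ∈ vs := by
      rw [PySem.Set.mem_add]
      constructor
      · rintro (h | h)
        · exact hqiff.mp h
        · exact absurd h.symm (hmida (x + (pvD a).1, y + (pvD a).2))
      · intro h; exact Or.inl (hqiff.mpr h)
    have hh2mem : pvHalf2 (x, y, a) ∉ PySem.Set.add E (pvHalf1 (x, y, a)) := by
      intro h
      rcases (PySem.Set.mem_add _ _ _).mp h with h | h
      · exact hf2 h
      · exact hh12 h.symm
    -- V-membership clause for the new states
    have hVnew : ∀ q' : Int × Int,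
        q' ∈ PySem.Set.add (PySem.Set.add V (pvMid (x, y, a))) (2*(x + (pvD a).1), 2*(y + (pvD a).2))
        ↔ ((∃ p ∈ PySem.Set.add vs (x + (pvD a).1, y + (pvD a).2), q' = (2 * p.1, 2 * p.2)) ∨
            ∃ t' ∈ PySem.Set.add es (x, y, a), q' = pvMid t') := by
      intro q'
      simp only [PySem.Set.mem_add]
      constructor
      · rintro ((h | h) | h)
        · rcases (hV q').mp h with ⟨p, hp, hpe⟩ | ⟨t'', ht'', hte⟩
          · exact Or.inl ⟨p, Or.inl hp, hpe⟩
          · exact Or.inr ⟨t'', Or.inl ht'', hte⟩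
        · exact Or.inr ⟨(x, y, a), Or.inr rfl, h⟩
        · exact Or.inl ⟨(x + (pvD a).1, y + (pvD a).2), Or.inr rfl, h⟩
      · rintro (⟨p, hp | hp, hpe⟩ | ⟨t'', ht'' | ht'', hte⟩)
        · exact Or.inl (Or.inl ((hV q').mpr (Or.inl ⟨p, hp, hpe⟩)))
        · subst hp; exact Or.inr hpe
        · exact Or.inl (Or.inl ((hV q').mpr (Or.inr ⟨t'', ht'', hte⟩)))
        · subst ht''; exact Or.inl (Or.inr hte)
    -- E-membership clause for the new states
    have hEnew : ∀ h' : (Int × Int) × (Int × Int),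
        h' ∈ PySem.Set.add (PySem.Set.add E (pvHalf1 (x, y, a))) (pvHalf2 (x, y, a))
        ↔ ∃ t' ∈ PySem.Set.add es (x, y, a), h' = pvHalf1 t' ∨ h' = pvHalf2 t' := by
      intro h'
      simp only [PySem.Set.mem_add]
      constructor
      · rintro ((h | h) | h)
        · obtain ⟨t'', ht'', hh⟩ := (hE h').mp h
          exact ⟨t'', Or.inl ht'', hh⟩
        · exact ⟨(x, y, a), Or.inr rfl, Or.inl h⟩
        · exact ⟨(x, y, a), Or.inr rfl, Or.inr h⟩
      · rintro ⟨t'', ht'' | ht'', hh⟩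
        · exact Or.inl (Or.inl ((hE h').mpr ⟨t'', ht'', hh⟩))
        · subst ht''
          rcases hh with hh | hh
          · exact Or.inl (Or.inr hh)
          · exact Or.inr hh
    -- length bookkeeping
    have hlVnew : PySem.Set.len (PySem.Set.add (PySem.Set.add V (pvMid (x, y, a)))
          (2*(x + (pvD a).1), 2*(y + (pvD a).2)))
        = PySem.Set.len V + (if pvMid (x, y, a) ∈ V then 0 else 1)
          + (if (x + (pvD a).1, y + (pvD a).2) ∈ vs then 0 else 1) := by
      rw [pv_add_len, pv_add_len]
      by_cases h1 : pvMid (x, y, a) ∈ V <;> by_cases h2 : (x + (pvD a).1, y + (pvD a).2) ∈ vs <;>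
        simp [h1, h2, hqiff] <;> exact fun h => hmida (x + (pvD a).1, y + (pvD a).2) h.symm
    have hlEnew : PySem.Set.len (PySem.Set.add (PySem.Set.add E (pvHalf1 (x, y, a))) (pvHalf2 (x, y, a)))
        = PySem.Set.len E + 2 := by
      rw [pv_add_len, pv_add_len, if_neg hf1, if_neg hh2mem]; ring
    have hlvs : PySem.Set.len (PySem.Set.add vs (x + (pvD a).1, y + (pvD a).2))
        = PySem.Set.len vs + (if (x + (pvD a).1, y + (pvD a).2) ∈ vs then 0 else 1) := by
      rw [pv_add_len]; by_cases h2 : (x + (pvD a).1, y + (pvD a).2) ∈ vs <;> simp [h2]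
    have hles : PySem.Set.len (PySem.Set.add es (x, y, a)) = PySem.Set.len es + 1 := by
      rw [pv_add_len, if_neg hCt]
    by_cases hodd : a % 2 ≠ 0
    · rw [if_pos hodd]
      by_cases hcr : ((x + (pvD (a-1)).1, y + (pvD (a-1)).2, (a+2) % 8) ∈ es
          ∨ (x + (pvD ((a+1) % 8)).1, y + (pvD ((a+1) % 8)).2, (a-2) % 8) ∈ es)
      · rw [if_pos hcr]
        have hmV : pvMid (x, y, a) ∈ V := hmiff.mpr ⟨hodd, hcr⟩
        refine ⟨by ring, by ring, hVnew, hEnew, ?_, ?_, by omega, ?_, ?_, ?_⟩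
        · rw [hlVnew, hlvs, hles, if_pos hmV]
          show _ = _ - (v + 1)
          omega
        · rw [hlEnew, hles]; show _ = 2 * _; omega
        · intro t'' ht''
          rcases (PySem.Set.mem_add _ _ _).mp ht'' with h' | h'
          · exact hdir _ h'
          · subst h'; exact ⟨h0, h8⟩
        · exact (PySem.Set.mem_add _ _ _).mpr (Or.inr rfl)
        · intro t'' ht''
          rcases (PySem.Set.mem_add _ _ _).mp ht'' with h' | h'
          · exact ⟨(PySem.Set.mem_add _ _ _).mpr (Or.inl (hends _ h').1),
              (PySem.Set.mem_add _ _ _).mpr (Or.inl (hends _ h').2)⟩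
          · subst h'
            exact ⟨(PySem.Set.mem_add _ _ _).mpr (Or.inl hxy),
              (PySem.Set.mem_add _ _ _).mpr (Or.inr rfl)⟩
      · rw [if_neg hcr]
        have hmV : pvMid (x, y, a) ∉ V := fun h => hcr (hmiff.mp h).2
        refine ⟨by ring, by ring, hVnew, hEnew, ?_, ?_, by omega, ?_, ?_, ?_⟩
        · rw [hlVnew, hlvs, hles, if_neg hmV]
          show _ = _ - v
          omega
        · rw [hlEnew, hles]; show _ = 2 * _; omega
        · intro t'' ht''
          rcases (PySem.Set.mem_add _ _ _).mp ht'' with h' | h'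
          · exact hdir _ h'
          · subst h'; exact ⟨h0, h8⟩
        · exact (PySem.Set.mem_add _ _ _).mpr (Or.inr rfl)
        · intro t'' ht''
          rcases (PySem.Set.mem_add _ _ _).mp ht'' with h' | h'
          · exact ⟨(PySem.Set.mem_add _ _ _).mpr (Or.inl (hends _ h').1),
              (PySem.Set.mem_add _ _ _).mpr (Or.inl (hends _ h').2)⟩
          · subst h'
            exact ⟨(PySem.Set.mem_add _ _ _).mpr (Or.inl hxy),
              (PySem.Set.mem_add _ _ _).mpr (Or.inr rfl)⟩
    · rw [if_neg hodd]
      have hmV : pvMid (x, y, a) ∉ V := fun h => hodd (hmiff.mp h).1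
      refine ⟨by ring, by ring, hVnew, hEnew, ?_, ?_, by omega, ?_, ?_, ?_⟩
      · rw [hlVnew, hlvs, hles, if_neg hmV]
        show _ = _ - v
        omega
      · rw [hlEnew, hles]; show _ = 2 * _; omega
      · intro t'' ht''
        rcases (PySem.Set.mem_add _ _ _).mp ht'' with h' | h'
        · exact hdir _ h'
        · subst h'; exact ⟨h0, h8⟩
      · exact (PySem.Set.mem_add _ _ _).mpr (Or.inr rfl)
      · intro t'' ht''
        rcases (PySem.Set.mem_add _ _ _).mp ht'' with h' | h'
        · exact ⟨(PySem.Set.mem_add _ _ _).mpr (Or.inl (hends _ h').1),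
            (PySem.Set.mem_add _ _ _).mpr (Or.inl (hends _ h').2)⟩
        · subst h'
          exact ⟨(PySem.Set.mem_add _ _ _).mpr (Or.inl hxy),
            (PySem.Set.mem_add _ _ _).mpr (Or.inr rfl)⟩


theorem pv_fold (l : List Int) (hpre : ∀ a ∈ l, 0 ≤ a ∧ a < 8) :
    ∀ sa sb, pvInv sa sb → pvInv (l.foldl stepA sa) (l.foldl stepB sb) := by
  induction l with
  | nil => exact fun sa sb h => h
  | cons a l ih =>
    intro sa sb h
    have ha := hpre a (List.mem_cons_self ..)
    rcases sa with ⟨vs, es, v, e, x, y⟩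
    rcases sb with ⟨V, E, X, Y⟩
    exact ih (fun b hb => hpre b (List.mem_cons_of_mem _ hb)) _ _
      (pv_step vs es v e x y V E X Y a ha.1 ha.2 h)

theorem pv_init : pvInv (PySem.Set.add PySem.Set.empty ((0 : Int), (0 : Int)), PySem.Set.empty, 0, 0, 0, 0)
    (PySem.Set.add PySem.Set.empty ((0 : Int), (0 : Int)), PySem.Set.empty, 0, 0) := by
  have hadd : PySem.Set.add (PySem.Set.empty : PySem.Set (Int × Int)) ((0 : Int), (0 : Int))
      = [((0 : Int), (0 : Int))] := by decide
  rw [hadd]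
  refine ⟨rfl, rfl, ?_, ?_, by decide, by decide, rfl, ?_, by decide, ?_⟩
  · intro q
    simp [PySem.Set.empty, Prod.ext_iff]
  · intro h
    simp [PySem.Set.empty]
  · intro t ht
    simp [PySem.Set.empty] at ht
  · intro t ht
    simp [PySem.Set.empty] at ht

-- ===== VERDICT (by name: the statement is the Claim_ definition above) =====
theorem solution_spec : Claim_equal_solution := by
  unfold Claim_equal_solution
  intro arrows _ hpre
  unfold Spec_solution solution solution_alt
  have h := pv_fold arrows hpre _ _ pv_init
  revert h
  rcases arrows.foldl stepA (PySem.Set.add PySem.Set.empty ((0 : Int), (0 : Int)), PySem.Set.empty, 0, 0, 0, 0)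
    with ⟨vs, es, v, e, x, y⟩
  rcases arrows.foldl stepB (PySem.Set.add PySem.Set.empty ((0 : Int), (0 : Int)), PySem.Set.empty, 0, 0)
    with ⟨V, E, X, Y⟩
  rintro ⟨-, -, -, -, hlV, hlE, he, -, -, -⟩
  show 1 + (e + PySem.Set.len es) - (v + PySem.Set.len vs) = PySem.Set.len E - PySem.Set.len V + 1
  omega
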